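-- pv_equiv track=rewrite | github.com/sarafanshul/Bible | various/METHODS/Length&Sum_Digits.py | check
-- ===== SOURCE A (Python) =====
-- def check (s , m):
--
-- 	if m==1 and s==0:
-- 		return (0,0)
--
-- 	elif s > m*9 or s == 0:
-- 		return (-1,-1)
--
-- 	else:
--
-- 		Low = 10**(m-1)
-- 		for i in range(s-1):
-- 			Low += 10**(i//9)
--
-- 		High = 0
-- 		for i in range(s):
-- 			High += 10**(m-1-i//9)
--
-- 		return (Low , High)
-- ===== SOURCE B (Python) =====
-- def check(s, m):
--     if m == 1 and s == 0:
--         return (0, 0)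
--
--     if s <= 0 or s > 9 * m:
--         return (-1, -1)
--
--     # Largest m-digit number with digit sum s: a block of q nines, the
--     # remainder digit r, then zeros -- written as one closed-form expression.
--     q, r = divmod(s, 9)
--     if r == 0:
--         high = (10 ** q - 1) * 10 ** (m - q)
--     else:
--         high = ((10 ** q - 1) * 10 + r) * 10 ** (m - q - 1)
--
--     # Smallest: leading digit as small as possible, remaining sum pushed to
--     # the low end as a remainder digit followed by a block of nines.
--     q2, r2 = divmod(s - 1, 9)
--     nines = 10 ** q2 - 1
--     if q2 == m - 1:
--         low = (1 + r2) * 10 ** q2 + nines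
--     else:
--         low = 10 ** (m - 1) + r2 * 10 ** q2 + nines
--
--     return (low, high)
-- ===== Notes on version B (the rewrite author's own statement) =====
-- stated objective: faster
-- what changed: A accumulates the small/large numbers by adding 10**(i//9) (resp. 10**(m-1-i//9)) once per unit of digit sum, O(s) big-int additions; B computes both numbers in closed form from divmod(s,9) and divmod(s-1,9), directly assembling the greedy digit blocks (nines, remainder digit, zeros) with a constant number of big-int operations.
-- outside the precondition, e.g. on check(-3, 1): A returns (1, 0), B returns (-1, -1); on check(-1, 0): A returns (0.1, 0), B returns (-1, -1)
import Mathlib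
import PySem

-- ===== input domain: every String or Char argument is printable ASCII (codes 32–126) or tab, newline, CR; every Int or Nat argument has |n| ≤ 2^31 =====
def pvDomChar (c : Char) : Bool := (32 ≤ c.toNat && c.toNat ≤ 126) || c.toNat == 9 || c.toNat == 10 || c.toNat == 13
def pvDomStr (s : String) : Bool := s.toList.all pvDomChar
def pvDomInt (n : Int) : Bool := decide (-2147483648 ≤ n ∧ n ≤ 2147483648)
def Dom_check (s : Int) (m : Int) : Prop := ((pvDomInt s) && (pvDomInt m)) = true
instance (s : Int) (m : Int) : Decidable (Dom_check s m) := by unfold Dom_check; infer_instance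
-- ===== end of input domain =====

-- B replaces A's two O(s)-iteration digit-sum loops by closed-form greedy constructions
-- of the smallest/largest numbers; Pre_ restricts to nonnegative digit sums s.


-- ===== PORT A =====
def check (s : Int) (m : Int) : List Int :=
  if m = 1 ∧ s = 0 then [0, 0]
  else if s > m * 9 ∨ s = 0 then [-1, -1]
  else
    let Low := (PySem.List.pyRange 0 (s - 1) 1).foldl
      (fun acc i => acc + 10 ^ (PySem.Int.floordiv i 9).toNat) (10 ^ (m - 1).toNat)
    let High := (PySem.List.pyRange 0 s 1).foldl
      (fun acc i => acc + 10 ^ (m - 1 - PySem.Int.floordiv i 9).toNat) 0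
    [Low, High]

-- ===== PORT B =====
def check_alt (s : Int) (m : Int) : List Int :=
  if m = 1 ∧ s = 0 then [0, 0]
  else if s ≤ 0 ∨ s > 9 * m then [-1, -1]
  else
    let q := PySem.Int.floordiv s 9
    let r := PySem.Int.mod s 9
    let high := if r = 0 then (10 ^ q.toNat - 1) * 10 ^ (m - q).toNat
      else ((10 ^ q.toNat - 1) * 10 + r) * 10 ^ (m - q - 1).toNat
    let q2 := PySem.Int.floordiv (s - 1) 9
    let r2 := PySem.Int.mod (s - 1) 9
    let nines := 10 ^ q2.toNat - 1
    let low := if q2 = m - 1 then (1 + r2) * 10 ^ q2.toNat + nines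
      else 10 ^ (m - 1).toNat + r2 * 10 ^ q2.toNat + nines
    [low, high]

-- ===== PRECONDITION & SPEC =====
-- Pre_ restricts to the natural domain of nonnegative digit sums: for s < 0 (no number has
-- a negative digit sum) A falls into its construction branch and returns an accidental
-- low/high pair — a non-int float when m ≤ 0 — while B reports impossibility the same way
-- it does for s = 0 or s > 9*m; see the excluded examples cited in claim.json.
def Pre_check (s : Int) (m : Int) : Prop := 0 ≤ s
instance (s : Int) (m : Int) : Decidable (Pre_check s m) := by unfold Pre_check; infer_instance
def pvWitness_check : Int × Int := (11, 3)

def Spec_check (s : Int) (m : Int) (out : List Int) : Prop := out = check_alt s m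
instance (s : Int) (m : Int) (out : List Int) : Decidable (Spec_check s m out) := by unfold Spec_check; infer_instance

-- ===== CLAIM (what is proved, stated in full; the proofs are below) =====
def Claim_equal_check : Prop := ∀ (s : Int) (m : Int), Dom_check s m → Pre_check s m → Spec_check s m (check s m)

-- ===== LEMMAS AND PROOFS =====

-- A's Low loop: the sum of 10^(i//9) over i < n is a remainder digit followed by a block of nines.
theorem lowSum (n : Nat) :
    ((PySem.List.pyRange 0 (n : Int) 1).map
      (fun i => (10 : Int) ^ (PySem.Int.floordiv i 9).toNat)).sum
      = ((n % 9 : Nat) : Int) * 10 ^ (n / 9) + (10 ^ (n / 9) - 1) := by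
  induction n with
  | zero => simp
  | succ n ih =>
    have h1 : ((n + 1 : Nat) : Int) = (n : Int) + 1 := by push_cast; ring
    rw [h1, PySem.List.pyRange_one_succ_right (by positivity), List.map_append, List.sum_append, ih]
    have hf : PySem.Int.floordiv (n : Int) 9 = ((n / 9 : Nat) : Int) := by
      exact_mod_cast PySem.Int.floordiv_natCast n 9
    simp only [List.map_cons, List.map_nil, List.sum_cons, List.sum_nil, hf, Int.toNat_natCast]
    rcases Nat.lt_or_ge (n % 9) 8 with h8 | h8
    · have hd : (n + 1) / 9 = n / 9 := by omega
      have hm : (n + 1) % 9 = n % 9 + 1 := by omega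
      rw [hd, hm]; push_cast; ring
    · have h8' : n % 9 = 8 := by omega
      have hd : (n + 1) / 9 = n / 9 + 1 := by omega
      have hm : (n + 1) % 9 = 0 := by omega
      rw [hd, hm, h8', pow_succ]; push_cast; ring

-- A's High loop: the sum of 10^(m-1-i//9) over i < n ≤ 9m is a block of nines,
-- then the remainder digit, then zeros.
theorem highSum (n M : Nat) (h : n ≤ 9 * M) :
    ((PySem.List.pyRange 0 (n : Int) 1).map
      (fun i => (10 : Int) ^ (((M : Int) - 1 - PySem.Int.floordiv i 9).toNat))).sum
      = (10 ^ (n / 9) - 1) * 10 ^ (M - n / 9) + ((n % 9 : Nat) : Int) * 10 ^ (M - 1 - n / 9) := by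
  induction n with
  | zero => simp
  | succ n ih =>
    have hq : n / 9 ≤ M - 1 := by omega
    have hM : 1 ≤ M := by omega
    have h1 : ((n + 1 : Nat) : Int) = (n : Int) + 1 := by push_cast; ring
    rw [h1, PySem.List.pyRange_one_succ_right (by positivity), List.map_append, List.sum_append,
      ih (by omega)]
    have hf : PySem.Int.floordiv (n : Int) 9 = ((n / 9 : Nat) : Int) := by
      exact_mod_cast PySem.Int.floordiv_natCast n 9
    have he : ((M : Int) - 1 - ((n / 9 : Nat) : Int)).toNat = M - 1 - n / 9 := by omega
    simp only [List.map_cons, List.map_nil, List.sum_cons, List.sum_nil, hf, he]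
    rcases Nat.lt_or_ge (n % 9) 8 with h8 | h8
    · have hd : (n + 1) / 9 = n / 9 := by omega
      have hm : (n + 1) % 9 = n % 9 + 1 := by omega
      rw [hd, hm]; push_cast; ring
    · have h8' : n % 9 = 8 := by omega
      have hd : (n + 1) / 9 = n / 9 + 1 := by omega
      have hm : (n + 1) % 9 = 0 := by omega
      have e1 : M - n / 9 = (M - 1 - n / 9) + 1 := by omega
      have e2 : M - (n / 9 + 1) = M - 1 - n / 9 := by omega
      rw [hd, hm, h8', e1, e2, pow_succ, pow_succ]
      push_cast; ring

theorem check_eq (s m : Int) (hs : 0 ≤ s) : check s m = check_alt s m := by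
  unfold check check_alt
  by_cases h1 : m = 1 ∧ s = 0
  · rw [if_pos h1, if_pos h1]
  · rw [if_neg h1, if_neg h1]
    by_cases h2 : s > m * 9 ∨ s = 0
    · rw [if_pos h2, if_pos (by omega)]
    · rw [if_neg h2, if_neg (by omega)]
      have hm1 : 1 ≤ m := by omega
      obtain ⟨n, rfl⟩ : ∃ n : Nat, s = (n : Int) := ⟨s.toNat, by omega⟩
      obtain ⟨M, rfl⟩ : ∃ M : Nat, m = (M : Int) := ⟨m.toNat, by omega⟩
      have hn : 1 ≤ n := by omega
      have hM : 1 ≤ M := by omega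
      have hnM : n ≤ 9 * M := by omega
      have hs1 : (n : Int) - 1 = ((n - 1 : Nat) : Int) := by omega
      have hq2 : PySem.Int.floordiv (((n - 1 : Nat)) : Int) 9 = (((n - 1) / 9 : Nat) : Int) := by
        exact_mod_cast PySem.Int.floordiv_natCast (n - 1) 9
      have hr2 : PySem.Int.mod (((n - 1 : Nat)) : Int) 9 = (((n - 1) % 9 : Nat) : Int) := by
        exact_mod_cast PySem.Int.mod_natCast (n - 1) 9
      have hq : PySem.Int.floordiv (n : Int) 9 = ((n / 9 : Nat) : Int) := by
        exact_mod_cast PySem.Int.floordiv_natCast n 9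
      have hr : PySem.Int.mod (n : Int) 9 = ((n % 9 : Nat) : Int) := by
        exact_mod_cast PySem.Int.mod_natCast n 9
      have hqM : (n - 1) / 9 ≤ M - 1 := by omega
      have hMt : ((M : Int) - 1).toNat = M - 1 := by omega
      simp only [hs1, hq2, hr2, hq, hr, PySem.List.foldl_add, Int.toNat_natCast, hMt,
        lowSum (n - 1), highSum n M hnM, zero_add]
      congr 1
      -- Low = low
      · by_cases hEq : (((n - 1) / 9 : Nat) : Int) = (M : Int) - 1
        · have hE : (n - 1) / 9 = M - 1 := by omega
          rw [if_pos hEq, hE]; push_cast; ring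
        · rw [if_neg hEq]; push_cast; ring
      -- High = high
      · congr 1
        by_cases hr0 : (((n % 9 : Nat)) : Int) = 0
        · have h0 : n % 9 = 0 := by omega
          have hMQ : ((M : Int) - ((n / 9 : Nat) : Int)).toNat = M - n / 9 := by omega
          rw [if_pos hr0, hMQ, h0]; push_cast; ring
        · have h0 : n % 9 ≠ 0 := by omega
          have hQM : n / 9 ≤ M - 1 := by omega
          have hMQ : ((M : Int) - ((n / 9 : Nat) : Int) - 1).toNat = M - 1 - n / 9 := by omega
          have e1 : M - n / 9 = (M - 1 - n / 9) + 1 := by omega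
          rw [if_neg hr0, hMQ, e1, pow_succ]; push_cast; ring

-- ===== VERDICT (by name: the statement is the Claim_ definition above) =====
theorem check_spec : Claim_equal_check := by
  intro s m _ hs
  exact check_eq s m hs
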